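-- pv_equiv track=rewrite | github.com/gurramdikshareddy/LeetCode | Medium/2818. Apply Operations to Maximize Score/python3.py | calculateSubarrayCountPerScore
-- ===== SOURCE A (Python) =====
-- from collections import deque
--
-- MOD = 10**9 + 7
--
-- def calculateSubarrayCountPerScore(score):
--     n = len(score)
--     pge = [-1] * n
--     stack = deque()
--
--     # Calculate Previous Greater Element (PGE)
--     for i in range(n):
--         while stack and score[stack[-1]] < score[i]:
--             stack.pop()
--         if stack:
--             pge[i] = stack[-1]
--         stack.append(i)
--
--     # Calculate Next Greater Element (NGE) and subarray count
--     stack.clear()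
--     subarray_count = [0] * n
--     for i in range(n - 1, -1, -1):
--         while stack and score[stack[-1]] <= score[i]:
--             stack.pop()
--         nge = stack[-1] if stack else n
--         count = (nge - i) * (i - pge[i])
--         subarray_count[i] = count % MOD
--         stack.append(i)
--     return subarray_count
-- ===== SOURCE B (Python) =====
-- MOD = 10**9 + 7
--
-- def _runlen(xs, v, strict):
--     c = 0
--     for x in xs:
--         if (x < v) if strict else (x <= v):
--             c += 1
--         else:
--             break
--     return c
--
-- def calculateSubarrayCountPerScore(score):
--     res = []
--     for i in range(len(score)):
--         v = score[i]
--         L = _runlen(score[:i][::-1], v, True)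
--         R = _runlen(score[i+1:], v, False)
--         res.append((L + 1) * (R + 1) % MOD)
--     return res
-- ===== Notes on version B (the rewrite author's own statement) =====
-- stated objective: simpler
-- what changed: B drops both monotonic-stack passes and the pge array: for each index it directly measures the run of strictly smaller elements to the left and of less-or-equal elements to the right and multiplies the two run lengths plus one.
import Mathlib
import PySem

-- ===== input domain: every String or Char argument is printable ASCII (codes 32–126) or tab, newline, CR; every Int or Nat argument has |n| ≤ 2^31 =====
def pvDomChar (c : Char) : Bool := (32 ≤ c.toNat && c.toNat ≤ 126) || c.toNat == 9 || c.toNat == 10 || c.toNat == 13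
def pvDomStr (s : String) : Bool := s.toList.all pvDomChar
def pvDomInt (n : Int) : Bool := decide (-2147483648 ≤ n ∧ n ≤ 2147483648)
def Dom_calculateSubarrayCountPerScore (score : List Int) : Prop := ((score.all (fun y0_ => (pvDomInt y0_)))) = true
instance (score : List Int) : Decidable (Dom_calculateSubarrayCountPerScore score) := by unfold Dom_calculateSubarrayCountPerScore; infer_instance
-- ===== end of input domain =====

-- B replaces A's two monotonic-stack passes by a direct per-index expansion
-- (left run of strictly smaller, right run of less-or-equal); objective: simpler.

-- ===== PORT A =====
def pvMOD : Int := 1000000007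

-- the `while stack and <cmp>: stack.pop()` loop (stack top at the head)
def pvPop (p : Nat → Bool) : List Nat → List Nat
  | [] => []
  | j :: s => if p j then pvPop p s else j :: s

def pvStep1 (score : List Int) (st : List Int × List Nat) (i : Nat) : List Int × List Nat :=
  let g : Nat → Int := fun j => score.getD j 0
  let stack := pvPop (fun j => decide (g j < g i)) st.2
  let pge := match stack with
    | [] => st.1
    | j :: _ => st.1.set i (j : Int)
  (pge, i :: stack)

def pvStep2 (score : List Int) (pge : List Int) (st : List Int × List Nat) (i : Nat) : List Int × List Nat :=
  let n := score.length
  let g : Nat → Int := fun j => score.getD j 0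
  let stack := pvPop (fun j => decide (g j ≤ g i)) st.2
  let nge : Int := match stack with
    | [] => (n : Int)
    | j :: _ => (j : Int)
  let c := (nge - (i : Int)) * ((i : Int) - pge.getD i 0)
  (st.1.set i (PySem.Int.mod c pvMOD), i :: stack)

def calculateSubarrayCountPerScore (score : List Int) : List Int :=
  let n := score.length
  -- first pass: previous greater-or-equal element
  let pge := ((List.range n).foldl (pvStep1 score) (List.replicate n (-1 : Int), ([] : List Nat))).1
  -- second pass: next strictly greater element and the counts
  (((List.range n).reverse).foldl (pvStep2 score pge) (List.replicate n (0 : Int), ([] : List Nat))).1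

-- ===== PORT B =====
-- _runlen from Source B: length of the initial run satisfying the comparison
def pvRunlen (xs : List Int) (v : Int) (strict : Bool) : Nat :=
  match xs with
  | [] => 0
  | x :: t => if (if strict then decide (x < v) else decide (x ≤ v)) then pvRunlen t v strict + 1 else 0

def calculateSubarrayCountPerScore_alt (score : List Int) : List Int :=
  (List.range score.length).map (fun i =>
    let v := score.getD i 0
    let L := pvRunlen ((score.take i).reverse) v true
    let R := pvRunlen (score.drop (i+1)) v false
    PySem.Int.mod (((L : Int) + 1) * ((R : Int) + 1)) pvMOD)

-- ===== PRECONDITION & SPEC =====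
def Spec_calculateSubarrayCountPerScore (score : List Int) (out : List Int) : Prop := out = calculateSubarrayCountPerScore_alt score
instance (score : List Int) (out : List Int) : Decidable (Spec_calculateSubarrayCountPerScore score out) := by unfold Spec_calculateSubarrayCountPerScore; infer_instance

-- ===== CLAIM (what is proved, stated in full; the proofs are below) =====
def Claim_equal_calculateSubarrayCountPerScore : Prop := ∀ (score : List Int), Dom_calculateSubarrayCountPerScore score → Spec_calculateSubarrayCountPerScore score (calculateSubarrayCountPerScore score)

-- ===== LEMMAS AND PROOFS =====

-- first k (scanning i-1, i-2, …, 0) with p k = false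
def pvFindLt (p : Nat → Bool) : Nat → Option Nat
  | 0 => none
  | i+1 => if p i then pvFindLt p i else some i

lemma pvFindLt_lt {p : Nat → Bool} : ∀ {i k : Nat}, pvFindLt p i = some k → k < i := by
  intro i
  induction i with
  | zero => intro k h; simp [pvFindLt] at h
  | succ i ih =>
    intro k h
    simp only [pvFindLt] at h
    split at h
    · exact Nat.lt_succ_of_lt (ih h)
    · cases h; exact Nat.lt_succ_self i

lemma pvFindLt_spec_some {p : Nat → Bool} : ∀ {i k : Nat}, pvFindLt p i = some k →
    p k = false ∧ ∀ m, k < m → m < i → p m = true := by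
  intro i
  induction i with
  | zero => intro k h; simp [pvFindLt] at h
  | succ i ih =>
    intro k h
    simp only [pvFindLt] at h
    split at h
    · rename_i hp
      obtain ⟨h1, h2⟩ := ih h
      refine ⟨h1, fun m hm hmi => ?_⟩
      rcases Nat.lt_succ_iff_lt_or_eq.mp hmi with h' | h'
      · exact h2 m hm h'
      · subst h'; exact hp
    · rename_i hp
      cases h
      exact ⟨Bool.not_eq_true _ ▸ (by simpa using hp), fun m hm hmi => absurd hmi (by omega)⟩

lemma pvFindLt_spec_none {p : Nat → Bool} : ∀ {i : Nat}, pvFindLt p i = none →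
    ∀ m, m < i → p m = true := by
  intro i
  induction i with
  | zero => intro _ m hm; omega
  | succ i ih =>
    intro h m hm
    simp only [pvFindLt] at h
    split at h
    · rename_i hp
      rcases Nat.lt_succ_iff_lt_or_eq.mp hm with h' | h'
      · exact ih h m h'
      · subst h'; exact hp
    · cases h

lemma pvFindLt_skip {p : Nat → Bool} : ∀ {j k : Nat}, k ≤ j →
    (∀ m, k ≤ m → m < j → p m = true) → pvFindLt p j = pvFindLt p k := by
  intro j
  induction j with
  | zero => intro k hk _; interval_cases k; rfl
  | succ j ih =>
    intro k hk hall
    rcases Nat.lt_succ_iff_lt_or_eq.mp (Nat.lt_succ_of_le hk) with h | h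
    · have hkj : k ≤ j := by omega
      have : pvFindLt p (j+1) = pvFindLt p j := by
        simp [pvFindLt, hall j hkj (Nat.lt_succ_self j)]
      rw [this]
      exact ih hkj (fun m hm hmj => hall m hm (by omega))
    · subst h; rfl

-- the chain of previous-surviving stack entries starting at j
def pvChain (pv : Nat → Int) (cmp : Int → Int → Bool) (j : Nat) : List Nat :=
  j :: (match h : pvFindLt (fun k => cmp (pv k) (pv j)) j with
    | none => []
    | some k => pvChain pv cmp k)
termination_by j
decreasing_by exact pvFindLt_lt h

-- the stack after processing indices 0 … t-1
def pvStk (pv : Nat → Int) (cmp : Int → Int → Bool) : Nat → List Nat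
  | 0 => []
  | t+1 => t :: pvPop (fun k => cmp (pv k) (pv t)) (pvStk pv cmp t)

lemma pvPop_chain (pv : Nat → Int) (cmp : Int → Int → Bool)
    (htr : ∀ a b c, cmp a b = true → cmp b c = true → cmp a c = true) (i : Nat) :
    ∀ j, pvPop (fun k => cmp (pv k) (pv i)) (pvChain pv cmp j)
       = (match pvFindLt (fun k => cmp (pv k) (pv i)) (j+1) with
          | none => []
          | some k => pvChain pv cmp k) := by
  intro j
  induction j using Nat.strong_induction_on with
  | _ j ih =>
    by_cases hj : cmp (pv j) (pv i) = true
    · rw [pvChain]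
      simp only [pvPop, hj, if_true]
      have hfind : pvFindLt (fun k => cmp (pv k) (pv i)) (j+1)
          = pvFindLt (fun k => cmp (pv k) (pv i)) j := by
        simp [pvFindLt, hj]
      rw [hfind]
      rcases hs : pvFindLt (fun k => cmp (pv k) (pv j)) j with _ | k
      · -- everything below j pops for j, hence for i by transitivity
        simp only [hs]
        have : pvFindLt (fun k => cmp (pv k) (pv i)) j = pvFindLt (fun k => cmp (pv k) (pv i)) 0 := by
          apply pvFindLt_skip (Nat.zero_le j)
          intro m _ hmj
          exact htr _ _ _ (pvFindLt_spec_none hs m hmj) hj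
        rw [this]; rfl
      · simp only [hs]
        have hk := pvFindLt_lt hs
        obtain ⟨_, habove⟩ := pvFindLt_spec_some hs
        have : pvFindLt (fun k => cmp (pv k) (pv i)) j = pvFindLt (fun k => cmp (pv k) (pv i)) (k+1) := by
          apply pvFindLt_skip (by omega)
          intro m hm hmj
          exact htr _ _ _ (habove m (by omega) hmj) hj
        rw [this]
        exact ih k hk
    · simp only [Bool.not_eq_true] at hj
      have hfind : pvFindLt (fun k => cmp (pv k) (pv i)) (j+1) = some j := by
        simp [pvFindLt, hj]
      rw [hfind]
      conv_lhs => rw [pvChain]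
      simp only [pvPop, hj, Bool.false_eq_true, if_false]
      conv_rhs => rw [pvChain]

lemma pvStk_eq_chain (pv : Nat → Int) (cmp : Int → Int → Bool)
    (htr : ∀ a b c, cmp a b = true → cmp b c = true → cmp a c = true) :
    ∀ t, pvStk pv cmp (t+1) = pvChain pv cmp t := by
  intro t
  induction t with
  | zero =>
    rw [pvChain]
    simp [pvStk, pvPop, pvFindLt]
  | succ t ih =>
    show (t+1) :: pvPop _ (pvStk pv cmp (t+1)) = _
    rw [ih, pvPop_chain pv cmp htr (t+1) t]
    conv_rhs => rw [pvChain]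
    congr 1
    rcases hh : pvFindLt (fun k => cmp (pv k) (pv (t + 1))) (t + 1) with _ | k <;> simp [hh]

-- popped stack at iteration t (the state the pge/nge read-off sees)
lemma pvPop_stk (pv : Nat → Int) (cmp : Int → Int → Bool)
    (htr : ∀ a b c, cmp a b = true → cmp b c = true → cmp a c = true) :
    ∀ t, pvPop (fun k => cmp (pv k) (pv t)) (pvStk pv cmp t)
       = (match pvFindLt (fun k => cmp (pv k) (pv t)) t with
          | none => []
          | some k => pvChain pv cmp k) := by
  intro t
  cases t with
  | zero => rfl
  | succ t => rw [pvStk_eq_chain pv cmp htr, pvPop_chain pv cmp htr]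

lemma pvPop_map (f : Nat → Nat) (p : Nat → Bool) :
    ∀ l, pvPop p (l.map f) = (pvPop (fun k => p (f k)) l).map f := by
  intro l
  induction l with
  | nil => rfl
  | cons a l ih => by_cases h : p (f a) <;> simp [pvPop, h, ih]

lemma pvFindLt_congr {p q : Nat → Bool} : ∀ {i}, (∀ k, k < i → p k = q k) → pvFindLt p i = pvFindLt q i := by
  intro i
  induction i with
  | zero => intro _; rfl
  | succ i ih =>
    intro h
    simp only [pvFindLt, h i (Nat.lt_succ_self i)]
    split
    · exact ih (fun k hk => h k (by omega))
    · rfl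

-- relation between B's runlen and the descending search
lemma runlen_findLt (xs : List Int) (v : Int) (strict : Bool) :
    ∀ i, i ≤ xs.length →
    (pvRunlen ((xs.take i).reverse) v strict = i ∧
       pvFindLt (fun k => if strict then decide (xs.getD k 0 < v) else decide (xs.getD k 0 ≤ v)) i = none) ∨
    (pvRunlen ((xs.take i).reverse) v strict < i ∧
       pvFindLt (fun k => if strict then decide (xs.getD k 0 < v) else decide (xs.getD k 0 ≤ v)) i
         = some (i - 1 - pvRunlen ((xs.take i).reverse) v strict)) := by
  intro i
  induction i with
  | zero => intro _; left; simp [pvRunlen, pvFindLt]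
  | succ i ih =>
    intro hle
    have hi : i < xs.length := by omega
    have htake : (xs.take (i+1)).reverse = xs.getD i 0 :: (xs.take i).reverse := by
      rw [List.take_add_one]
      simp [List.getD, hi, List.getElem?_eq_getElem hi]
    rw [htake]
    by_cases hc : (if strict then decide (xs.getD i 0 < v) else decide (xs.getD i 0 ≤ v)) = true
    · have hstep : pvRunlen (xs.getD i 0 :: (xs.take i).reverse) v strict
          = pvRunlen ((xs.take i).reverse) v strict + 1 := by
        simp only [pvRunlen, hc, if_true]
      have hfind : pvFindLt (fun k => if strict then decide (xs.getD k 0 < v) else decide (xs.getD k 0 ≤ v)) (i+1)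
          = pvFindLt (fun k => if strict then decide (xs.getD k 0 < v) else decide (xs.getD k 0 ≤ v)) i := by
        simp only [pvFindLt]
        rw [if_pos hc]
      rw [hstep, hfind]
      rcases ih (by omega) with ⟨h1, h2⟩ | ⟨h1, h2⟩
      · left; exact ⟨by omega, h2⟩
      · right; refine ⟨by omega, ?_⟩; rw [h2]; congr 1; omega
    · have hstep : pvRunlen (xs.getD i 0 :: (xs.take i).reverse) v strict = 0 := by
        rw [pvRunlen, if_neg hc]
      have hfind : pvFindLt (fun k => if strict then decide (xs.getD k 0 < v) else decide (xs.getD k 0 ≤ v)) (i+1)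
          = some i := by
        simp only [pvFindLt]
        rw [if_neg hc]
      rw [hstep, hfind]
      right; exact ⟨by omega, by norm_num⟩


-- small getD utilities
lemma pvGetD_replicate (n : Nat) (a : Int) (i : Nat) (h : i < n) :
    (List.replicate n a).getD i 0 = a := by
  rw [List.getD_eq_getElem _ _ (by simpa using h)]; simp

lemma pvGetD_set_self (l : List Int) (a : Int) (m : Nat) (hm : m < l.length) :
    (l.set m a).getD m 0 = a := by
  rw [List.getD_eq_getElem _ _ (by simpa using hm)]; simp

lemma pvGetD_set_ne (l : List Int) (a : Int) (m i : Nat) (hne : m ≠ i) (hi : i < l.length) :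
    (l.set m a).getD i 0 = l.getD i 0 := by
  rw [List.getD_eq_getElem _ _ (by simpa using hi), List.getD_eq_getElem _ _ hi]
  simp [List.getElem_set, hne]

lemma pvGetD_reverse (l : List Int) (k : Nat) (h : k < l.length) :
    l.reverse.getD k 0 = l.getD (l.length - 1 - k) 0 := by
  rw [List.getD_eq_getElem l.reverse 0 (by simpa using h), List.getElem_reverse,
      List.getD_eq_getElem l 0 (by omega)]

lemma pvRevTake (l : List Int) (m : Nat) :
    (l.reverse.take m).reverse = l.drop (l.length - m) := by
  rw [List.take_reverse]; simp

lemma pvRevRange_succ (m : Nat) : (List.range (m+1)).reverse = m :: (List.range m).reverse := by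
  rw [List.range_succ]; simp

lemma pvTrLt : ∀ a b c : Int, decide (a < b) = true → decide (b < c) = true → decide (a < c) = true := by
  intro a b c h1 h2; simp at *; omega

lemma pvTrLe : ∀ a b c : Int, decide (a ≤ b) = true → decide (b ≤ c) = true → decide (a ≤ c) = true := by
  intro a b c h1 h2; simp at *; omega

-- the values A's passes compute, as closed read-offs
def pvW (score : List Int) (k : Nat) : Int := score.getD (score.length - 1 - k) 0

def pvPgeA (score : List Int) (i : Nat) : Int :=
  match pvFindLt (fun k => decide (score.getD k 0 < score.getD i 0)) i with
  | none => -1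
  | some k => (k : Int)

def pvNgeA (score : List Int) (i : Nat) : Int :=
  match pvFindLt (fun k => decide (pvW score k ≤ pvW score (score.length - 1 - i))) (score.length - 1 - i) with
  | none => (score.length : Int)
  | some k => ((score.length - 1 - k : Nat) : Int)

def pvValA (score : List Int) (i : Nat) : Int :=
  PySem.Int.mod ((pvNgeA score i - (i : Int)) * ((i : Int) - pvPgeA score i)) pvMOD

-- pass 1 invariant
lemma pvPass1 (score : List Int) : ∀ t, t ≤ score.length →
    ((List.range t).foldl (pvStep1 score) (List.replicate score.length (-1 : Int), ([] : List Nat))).2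
        = pvStk (fun j => score.getD j 0) (fun a b => decide (a < b)) t
    ∧ ((List.range t).foldl (pvStep1 score) (List.replicate score.length (-1 : Int), ([] : List Nat))).1.length
        = score.length
    ∧ ∀ i, i < score.length →
        ((List.range t).foldl (pvStep1 score) (List.replicate score.length (-1 : Int), ([] : List Nat))).1.getD i 0
          = if i < t then pvPgeA score i else -1 := by
  intro t
  induction t with
  | zero =>
    intro _
    refine ⟨rfl, by simp, fun i hi => ?_⟩
    rw [if_neg (by omega)]
    exact pvGetD_replicate _ _ _ hi
  | succ t ih =>
    intro ht
    obtain ⟨h2, h1, hD⟩ := ih (by omega)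
    rw [List.range_succ, List.foldl_append, List.foldl_cons, List.foldl_nil]
    set S := (List.range t).foldl (pvStep1 score) (List.replicate score.length (-1 : Int), ([] : List Nat)) with hS
    have hpop : pvPop (fun j => decide (score.getD j 0 < score.getD t 0)) S.2
        = (match pvFindLt (fun k => decide (score.getD k 0 < score.getD t 0)) t with
           | none => []
           | some k => pvChain (fun j => score.getD j 0) (fun a b => decide (a < b)) k) := by
      rw [h2]
      exact pvPop_stk _ _ pvTrLt t
    have hstk : (t :: pvPop (fun j => decide (score.getD j 0 < score.getD t 0)) S.2)
        = pvStk (fun j => score.getD j 0) (fun a b => decide (a < b)) (t+1) := by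
      rw [h2]; rfl
    rcases hf : pvFindLt (fun k => decide (score.getD k 0 < score.getD t 0)) t with _ | k
    · have hpop' : pvPop (fun j => decide (score.getD j 0 < score.getD t 0)) S.2 = [] := by
        rw [hpop, hf]
      refine ⟨?_, ?_, ?_⟩
      · show (t :: pvPop _ S.2) = _
        exact hstk
      · show (match pvPop (fun j => decide (score.getD j 0 < score.getD t 0)) S.2 with
              | [] => S.1 | j :: _ => S.1.set t (j : Int)).length = _
        rw [hpop']; exact h1
      · intro i hi
        show (match pvPop (fun j => decide (score.getD j 0 < score.getD t 0)) S.2 with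
              | [] => S.1 | j :: _ => S.1.set t (j : Int)).getD i 0 = _
        rw [hpop']
        show S.1.getD i 0 = _
        rcases Nat.lt_or_ge i t with h | h
        · rw [hD i hi]; simp [h, Nat.lt_succ_of_lt h]
        · rcases Nat.eq_or_lt_of_le h with h' | h'
          · cases h'
            rw [hD t hi]
            simp only [lt_irrefl, if_false, Nat.lt_succ_self, if_true]
            rw [pvPgeA, hf]
          · rw [hD i hi]
            have hnt : ¬ i < t := by omega
            have hnt1 : ¬ i < t + 1 := by omega
            simp [hnt, hnt1]
    · have hpop' : pvPop (fun j => decide (score.getD j 0 < score.getD t 0)) S.2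
          = pvChain (fun j => score.getD j 0) (fun a b => decide (a < b)) k := by
        rw [hpop, hf]
      rw [pvChain] at hpop'
      refine ⟨?_, ?_, ?_⟩
      · show (t :: pvPop _ S.2) = _
        exact hstk
      · show (match pvPop (fun j => decide (score.getD j 0 < score.getD t 0)) S.2 with
              | [] => S.1 | j :: _ => S.1.set t (j : Int)).length = _
        rw [hpop']
        simpa using h1
      · intro i hi
        show (match pvPop (fun j => decide (score.getD j 0 < score.getD t 0)) S.2 with
              | [] => S.1 | j :: _ => S.1.set t (j : Int)).getD i 0 = _
        rw [hpop']
        show (S.1.set t (k : Int)).getD i 0 = _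
        rcases Nat.lt_or_ge i t with h | h
        · rw [pvGetD_set_ne S.1 _ t i (by omega) (by omega), hD i hi]
          simp [h, Nat.lt_succ_of_lt h]
        · rcases Nat.eq_or_lt_of_le h with h' | h'
          · cases h'
            rw [pvGetD_set_self S.1 _ t (by omega)]
            simp only [Nat.lt_succ_self, if_true]
            rw [pvPgeA, hf]
          · rw [pvGetD_set_ne S.1 _ t i (by omega) (by omega), hD i hi]
            have hnt : ¬ i < t := by omega
            have hnt1 : ¬ i < t + 1 := by omega
            simp [hnt, hnt1]

-- pass 2 invariant
lemma pvPass2 (score : List Int) (pge : List Int)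
    (hp : ∀ i, i < score.length → pge.getD i 0 = pvPgeA score i) :
    ∀ m, m ≤ score.length → ∀ s : List Int × List Nat,
    s.2 = (pvStk (pvW score) (fun a b => decide (a ≤ b)) (score.length - m)).map
            (fun k => score.length - 1 - k) →
    s.1.length = score.length →
    (∀ i, i < score.length → s.1.getD i 0 = if m ≤ i then pvValA score i else 0) →
    (((List.range m).reverse).foldl (pvStep2 score pge) s).1.length = score.length ∧
    ∀ i, i < score.length →
      (((List.range m).reverse).foldl (pvStep2 score pge) s).1.getD i 0 = pvValA score i := by
  intro m
  induction m with
  | zero =>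
    intro _ s _ hlen hval
    simp only [List.range_zero, List.reverse_nil, List.foldl_nil]
    exact ⟨hlen, fun i hi => by simpa using hval i hi⟩
  | succ m ih =>
    intro hm s hstk hlen hval
    rw [pvRevRange_succ, List.foldl_cons]
    have hmn : m < score.length := by omega
    have ht1 : score.length - m = (score.length - 1 - m) + 1 := by omega
    have htm : score.length - (m+1) = score.length - 1 - m := by omega
    have hwt : pvW score (score.length - 1 - m) = score.getD m 0 := by
      unfold pvW; congr 1; omega
    rw [htm] at hstk
    have hstep : pvStep2 score pge s m
        = (s.1.set m (PySem.Int.mod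
            (((match pvPop (fun j => decide (score.getD j 0 ≤ score.getD m 0)) s.2 with
               | [] => ((score.length : Nat) : Int)
               | j :: _ => (j : Int)) - (m : Int)) * ((m : Int) - pge.getD m 0)) pvMOD),
           m :: pvPop (fun j => decide (score.getD j 0 ≤ score.getD m 0)) s.2) := rfl
    have hpopmap : pvPop (fun j => decide (score.getD j 0 ≤ score.getD m 0)) s.2
        = (pvPop (fun k => decide (pvW score k ≤ pvW score (score.length - 1 - m)))
            (pvStk (pvW score) (fun a b => decide (a ≤ b)) (score.length - 1 - m))).map
          (fun k => score.length - 1 - k) := by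
      rw [hstk, pvPop_map, hwt]
      rfl
    have hpop2 : pvPop (fun k => decide (pvW score k ≤ pvW score (score.length - 1 - m)))
          (pvStk (pvW score) (fun a b => decide (a ≤ b)) (score.length - 1 - m))
        = (match pvFindLt (fun k => decide (pvW score k ≤ pvW score (score.length - 1 - m)))
              (score.length - 1 - m) with
           | none => []
           | some k => pvChain (pvW score) (fun a b => decide (a ≤ b)) k) :=
      pvPop_stk _ _ pvTrLe _
    -- the new stack is the mirrored stack for one more processed element
    have hstk' : (m :: pvPop (fun j => decide (score.getD j 0 ≤ score.getD m 0)) s.2)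
        = (pvStk (pvW score) (fun a b => decide (a ≤ b)) (score.length - m)).map
            (fun k => score.length - 1 - k) := by
      rw [ht1]
      show _ = ((score.length - 1 - m) ::
        pvPop (fun k => decide (pvW score k ≤ pvW score (score.length - 1 - m)))
          (pvStk (pvW score) (fun a b => decide (a ≤ b)) (score.length - 1 - m))).map
        (fun k => score.length - 1 - k)
      rw [List.map_cons, hpopmap]
      congr 1
      omega
    -- the value written at index m is pvValA score m
    have hnge : (match pvPop (fun j => decide (score.getD j 0 ≤ score.getD m 0)) s.2 with
                 | [] => ((score.length : Nat) : Int)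
                 | j :: _ => (j : Int)) = pvNgeA score m := by
      rw [hpopmap, hpop2]
      unfold pvNgeA
      rcases hf : pvFindLt (fun k => decide (pvW score k ≤ pvW score (score.length - 1 - m)))
          (score.length - 1 - m) with _ | k
      · rfl
      · show (match List.map (fun k => score.length - 1 - k)
              (pvChain (pvW score) (fun a b => decide (a ≤ b)) k) with
            | [] => ((score.length : Nat) : Int)
            | j :: _ => (j : Int)) = ((score.length - 1 - k : Nat) : Int)
        rw [pvChain]
        rfl
    have hvalm : PySem.Int.mod
          (((match pvPop (fun j => decide (score.getD j 0 ≤ score.getD m 0)) s.2 with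
             | [] => ((score.length : Nat) : Int)
             | j :: _ => (j : Int)) - (m : Int)) * ((m : Int) - pge.getD m 0)) pvMOD
        = pvValA score m := by
      rw [hnge, hp m hmn]
      rfl
    refine ih (by omega) (pvStep2 score pge s m) ?_ ?_ ?_
    · rw [hstep]
      exact hstk'
    · rw [hstep]
      simpa using hlen
    · intro i hi
      rw [hstep]
      show (s.1.set m _).getD i 0 = _
      rcases eq_or_ne m i with h | h
      · cases h
        rw [pvGetD_set_self s.1 _ m (by omega), hvalm, if_pos le_rfl]
      · rw [pvGetD_set_ne s.1 _ m i h (by omega), hval i hi]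
        rcases Nat.lt_or_ge i m with h' | h'
        · rw [if_neg (by omega), if_neg (by omega)]
        · rw [if_pos (by omega), if_pos (by omega)]

-- read-off of B's elements
lemma pvAlt_length (score : List Int) :
    (calculateSubarrayCountPerScore_alt score).length = score.length := by
  unfold calculateSubarrayCountPerScore_alt
  simp

lemma pvAlt_getD (score : List Int) (i : Nat) (hi : i < score.length) :
    (calculateSubarrayCountPerScore_alt score).getD i 0
      = PySem.Int.mod (((pvRunlen ((score.take i).reverse) (score.getD i 0) true : Int) + 1)
          * ((pvRunlen (score.drop (i+1)) (score.getD i 0) false : Int) + 1)) pvMOD := by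
  rw [List.getD_eq_getElem _ _ (by rw [pvAlt_length]; exact hi)]
  unfold calculateSubarrayCountPerScore_alt
  simp

-- A's closed read-off equals B's element
lemma pvValA_eq (score : List Int) (i : Nat) (hi : i < score.length) :
    pvValA score i
      = PySem.Int.mod (((pvRunlen ((score.take i).reverse) (score.getD i 0) true : Int) + 1)
          * ((pvRunlen (score.drop (i+1)) (score.getD i 0) false : Int) + 1)) pvMOD := by
  have hL := runlen_findLt score (score.getD i 0) true i (le_of_lt hi)
  have hR := runlen_findLt score.reverse (score.getD i 0) false (score.length - 1 - i)
      (by rw [List.length_reverse]; omega)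
  have hLfix : pvFindLt (fun k => if (true : Bool) then decide (score.getD k 0 < score.getD i 0)
        else decide (score.getD k 0 ≤ score.getD i 0)) i
      = pvFindLt (fun k => decide (score.getD k 0 < score.getD i 0)) i := by
    apply pvFindLt_congr
    intro k _
    simp
  have hRfix : pvFindLt (fun k => if (false : Bool) then decide (score.reverse.getD k 0 < score.getD i 0)
        else decide (score.reverse.getD k 0 ≤ score.getD i 0)) (score.length - 1 - i)
      = pvFindLt (fun k => decide (pvW score k ≤ pvW score (score.length - 1 - i)))
        (score.length - 1 - i) := by
    apply pvFindLt_congr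
    intro k hk
    have hk' : k < score.length := by omega
    have h1 : pvW score (score.length - 1 - i) = score.getD i 0 := by
      unfold pvW; congr 1; omega
    simp only [Bool.false_eq_true, if_false, h1, pvGetD_reverse score k hk']
    rfl
  have hdrop : (score.reverse.take (score.length - 1 - i)).reverse = score.drop (i+1) := by
    rw [pvRevTake]
    congr 1
    omega
  rw [hLfix] at hL
  rw [hRfix, hdrop] at hR
  have hLi : (i : Int) - pvPgeA score i
      = (pvRunlen ((score.take i).reverse) (score.getD i 0) true : Int) + 1 := by
    unfold pvPgeA
    rcases hL with ⟨hL1, hL2⟩ | ⟨hL1, hL2⟩ <;> rw [hL2]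
    · show (i : Int) - (-1) = _
      omega
    · show (i : Int) - ((i - 1 - pvRunlen ((score.take i).reverse) (score.getD i 0) true : Nat) : Int) = _
      omega
  have hRi : pvNgeA score i - (i : Int)
      = (pvRunlen (score.drop (i+1)) (score.getD i 0) false : Int) + 1 := by
    unfold pvNgeA
    rcases hR with ⟨hR1, hR2⟩ | ⟨hR1, hR2⟩ <;> rw [hR2]
    · show ((score.length : Nat) : Int) - (i : Int) = _
      omega
    · show ((score.length - 1 - (score.length - 1 - i - 1 -
          pvRunlen (score.drop (i+1)) (score.getD i 0) false) : Nat) : Int) - (i : Int) = _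
      omega
  unfold pvValA
  rw [hLi, hRi, Int.mul_comm]

-- ===== VERDICT (by name: the statement is the Claim_ definition above) =====
theorem calculateSubarrayCountPerScore_spec : Claim_equal_calculateSubarrayCountPerScore := by
  intro score _
  unfold Spec_calculateSubarrayCountPerScore
  obtain ⟨hs2, hlen1, hD⟩ := pvPass1 score score.length le_rfl
  have hp : ∀ i, i < score.length →
      ((List.range score.length).foldl (pvStep1 score)
        (List.replicate score.length (-1 : Int), ([] : List Nat))).1.getD i 0 = pvPgeA score i := by
    intro i hi
    rw [hD i hi, if_pos hi]
  obtain ⟨hlen2, hval⟩ := pvPass2 score _ hp score.length le_rfl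
      (List.replicate score.length (0 : Int), ([] : List Nat))
      (by simp [pvStk]) (by simp)
      (by
        intro i hi
        rw [if_neg (by omega)]
        exact pvGetD_replicate _ _ _ hi)
  have hA : calculateSubarrayCountPerScore score
      = (((List.range score.length).reverse).foldl
          (pvStep2 score ((List.range score.length).foldl (pvStep1 score)
            (List.replicate score.length (-1 : Int), ([] : List Nat))).1)
          (List.replicate score.length (0 : Int), ([] : List Nat))).1 := rfl
  rw [hA]
  apply List.ext_getElem
  · rw [hlen2, pvAlt_length]
  · intro i h1 h2
    have hi : i < score.length := by rwa [hlen2] at h1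
    rw [← List.getD_eq_getElem _ 0 h1, ← List.getD_eq_getElem _ 0 h2]
    rw [hval i hi, pvAlt_getD score i hi, pvValA_eq score i hi]
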